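-- pv_equiv track=rewrite | github.com/GuanZihan/Discrete-Optimization | Assignment/Knapsack/solver.py | process
-- ===== SOURCE A (Python) =====
-- def process(taken, capacity):
--     """Process the taken list"""
--     ret = []
--     for i in range(capacity):
--         if i in taken:
--             ret.append(1)
--         else:
--             ret.append(0)
--     return ret
-- ===== SOURCE B (Python) =====
-- def process(taken, capacity):
--     """Process the taken list"""
--     ret = [0] * capacity
--     for t in taken:
--         if 0 <= t < capacity:
--             ret[t] = 1
--     return ret
-- ===== Notes on version B (the rewrite author's own statement) =====
-- stated objective: faster
-- what changed: Instead of scanning taken for membership at every index of range(capacity), B preallocates a zero array and scatters a 1 at each in-range element of taken, removing the per-index membership scan.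
import Mathlib
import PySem

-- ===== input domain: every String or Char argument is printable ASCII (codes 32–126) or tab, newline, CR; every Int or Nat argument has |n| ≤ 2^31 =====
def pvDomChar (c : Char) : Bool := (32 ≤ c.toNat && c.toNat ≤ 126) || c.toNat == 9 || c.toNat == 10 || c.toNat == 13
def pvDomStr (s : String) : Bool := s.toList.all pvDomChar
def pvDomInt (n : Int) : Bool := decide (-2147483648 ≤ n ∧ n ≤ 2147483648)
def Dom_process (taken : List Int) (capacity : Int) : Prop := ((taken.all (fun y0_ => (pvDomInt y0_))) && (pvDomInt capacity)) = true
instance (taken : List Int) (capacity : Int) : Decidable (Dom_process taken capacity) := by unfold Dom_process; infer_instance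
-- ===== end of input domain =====

-- B replaces A's per-index membership scan over `taken` by a preallocated zero
-- array into which in-range elements of `taken` scatter a 1 (objective: faster).

-- ===== PORT A =====
-- for i in range(capacity): ret.append(1 if i in taken else 0)
def process (taken : List Int) (capacity : Int) : List Int :=
  (PySem.List.pyRange 0 capacity 1).foldl
    (fun ret i => ret ++ [if taken.contains i then 1 else 0]) []

-- ===== PORT B =====
-- ret = [0]*capacity; for t in taken: if 0 <= t < capacity: ret[t] = 1
def process_alt (taken : List Int) (capacity : Int) : List Int :=
  taken.foldl
    (fun ret t => if 0 ≤ t ∧ t < capacity then ret.set t.toNat 1 else ret)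
    (List.replicate capacity.toNat 0)

-- ===== PRECONDITION & SPEC =====
def Spec_process (taken : List Int) (capacity : Int) (out : List Int) : Prop := out = process_alt taken capacity
instance (taken : List Int) (capacity : Int) (out : List Int) : Decidable (Spec_process taken capacity out) := by unfold Spec_process; infer_instance

-- ===== CLAIM (what is proved, stated in full; the proofs are below) =====
def Claim_equal_process : Prop := ∀ (taken : List Int) (capacity : Int), Dom_process taken capacity → Spec_process taken capacity (process taken capacity)

-- ===== LEMMAS AND PROOFS =====

-- A's append loop is the map over the range
theorem pv_foldl_append_map (f : Int → Int) (l : List Int) (acc : List Int) :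
    l.foldl (fun r i => r ++ [f i]) acc = acc ++ l.map f := by
  induction l generalizing acc with
  | nil => simp
  | cons x xs ih => simp [List.foldl_cons, ih]

theorem pv_process_eq_map (taken : List Int) (capacity : Int) :
    process taken capacity
      = (List.range capacity.toNat).map
          (fun k : Nat => if taken.contains ((k : Int)) then 1 else 0) := by
  unfold process
  rw [pv_foldl_append_map, PySem.List.pyRange_one]
  simp only [Int.sub_zero, List.nil_append, List.map_map]
  refine List.map_congr_left ?_
  intro k _
  simp

-- B's scatter loop preserves the length
theorem pv_scatter_length (taken : List Int) (capacity : Int) (ret : List Int) :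
    (taken.foldl
      (fun ret t => if 0 ≤ t ∧ t < capacity then ret.set t.toNat 1 else ret)
      ret).length = ret.length := by
  induction taken generalizing ret with
  | nil => rfl
  | cons t ts ih =>
      simp only [List.foldl_cons]
      split_ifs <;> simp [ih]

-- pointwise value of B's scatter loop at an in-range position
theorem pv_scatter_getElem (taken : List Int) (capacity : Int) (ret : List Int)
    (hlen : ret.length = capacity.toNat) (j : Nat) (hj : j < ret.length)
    (hj' : j < (taken.foldl
      (fun ret t => if 0 ≤ t ∧ t < capacity then ret.set t.toNat 1 else ret)
      ret).length) :
    (taken.foldl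
      (fun ret t => if 0 ≤ t ∧ t < capacity then ret.set t.toNat 1 else ret)
      ret)[j]
      = if (j : Int) ∈ taken then 1 else ret[j] := by
  induction taken generalizing ret with
  | nil => simp
  | cons t ts ih =>
      have hjc : (j : Int) < capacity := by
        have : j < capacity.toNat := hlen ▸ hj
        omega
      simp only [List.foldl_cons] at hj' ⊢
      by_cases hrange : 0 ≤ t ∧ t < capacity
      · simp only [if_pos hrange] at hj' ⊢
        have hlen' : (ret.set t.toNat 1).length = capacity.toNat := by
          simpa using hlen
        have hj2 : j < (ret.set t.toNat 1).length := by simpa using hj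
        rw [ih (ret.set t.toNat 1) hlen' hj2 hj']
        by_cases hmem : (j : Int) ∈ ts
        · simp [hmem]
        · rcases hrange with ⟨ht0, htc⟩
          by_cases heq : t = (j : Int)
          · have : t.toNat = j := by omega
            simp [hmem, heq, this, List.getElem_set, List.mem_cons]
          · have h1 : t.toNat ≠ j := by omega
            have heq' : ¬((j : Int) = t) := fun h => heq h.symm
            simp [hmem, heq', h1, List.getElem_set, List.mem_cons]
      · simp only [if_neg hrange] at hj' ⊢
        have hne : t ≠ (j : Int) := by
          intro h; subst h
          exact hrange ⟨Int.natCast_nonneg j, hjc⟩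
        rw [ih ret hlen hj hj']
        have hne' : ¬((j : Int) = t) := fun h => hne h.symm
        simp [List.mem_cons, hne']
-- ===== VERDICT (by name: the statement is the Claim_ definition above) =====
theorem process_spec : Claim_equal_process := by
  intro taken capacity _
  unfold Spec_process process_alt
  rw [pv_process_eq_map]
  apply List.ext_getElem
  · simp [pv_scatter_length]
  · intro j hj1 hj2
    have hjr : j < capacity.toNat := by simpa using hj1
    have hjlen : j < (List.replicate capacity.toNat (0 : Int)).length := by simpa using hjr
    rw [pv_scatter_getElem taken capacity _ (by simp) j hjlen hj2,
        List.getElem_map, List.getElem_range, List.getElem_replicate]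
    simp
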